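-- pv_equiv track=rewrite | github.com/eliottcassidy2000/math | 04-computation/det_m_vs_adjacency_spectrum.py | count_H
-- ===== SOURCE A (Python) =====
-- from itertools import permutations
--
-- def count_H(T_dict, n):
--     count = 0
--     for perm in permutations(range(n)):
--         prod = 1
--         for k in range(n-1):
--             prod *= T_dict.get((perm[k], perm[k+1]), 0)
--         count += prod
--     return count
-- ===== SOURCE B (Python) =====
-- def hk_entry(T_dict, n, dp, mask, last):
--     if (mask >> last) & 1 == 0:
--         return 0
--     if mask == 1 << last:
--         return 1
--     prev = mask ^ (1 << last)
--     s = 0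
--     for p in range(n):
--         if (prev >> p) & 1:
--             s += T_dict.get((last, p), 0) * dp[prev][p]
--     return s
--
-- def count_H(T_dict, n):
--     # Held-Karp subset DP: dp[mask][f] = sum over weighted paths that start at f
--     # and visit exactly the vertices of mask; answer = sum over f of dp[full][f].
--     if n <= 0:
--         return 1
--     full = 1 << n
--     dp = [[0] * n]
--     for mask in range(1, full):
--         dp.append([hk_entry(T_dict, n, dp, mask, last) for last in range(n)])
--     return sum(dp[full - 1])
-- ===== Notes on version B (the rewrite author's own statement) =====
-- stated objective: faster
-- what changed: Replaced the O(n!*n) enumeration of all permutations by a Held-Karp subset dynamic program dp[mask][first] summing weighted Hamiltonian paths, O(2^n*n^2); intended as faster (asymptotic): timing runs measured B 11x-300x faster at the largest sizes where A still finishes (both are infeasible for very large n).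
import Mathlib
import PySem

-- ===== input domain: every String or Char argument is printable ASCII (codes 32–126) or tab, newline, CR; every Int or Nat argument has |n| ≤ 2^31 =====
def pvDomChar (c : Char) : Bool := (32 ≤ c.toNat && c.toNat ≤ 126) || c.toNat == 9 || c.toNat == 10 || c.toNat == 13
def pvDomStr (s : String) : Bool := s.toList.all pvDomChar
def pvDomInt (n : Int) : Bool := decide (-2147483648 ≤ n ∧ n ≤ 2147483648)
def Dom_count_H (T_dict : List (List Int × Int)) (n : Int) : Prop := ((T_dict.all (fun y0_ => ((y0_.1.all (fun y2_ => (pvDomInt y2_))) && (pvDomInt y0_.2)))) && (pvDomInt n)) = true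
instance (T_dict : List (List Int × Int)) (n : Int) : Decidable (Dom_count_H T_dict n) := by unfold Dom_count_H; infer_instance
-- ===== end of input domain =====

-- B replaces A's sum over all n! permutations by a Held-Karp subset DP
-- (dp[mask][first] = weighted paths starting at first covering mask); intended as
-- faster: timing runs measured B 11x-300x faster where A still finishes.
-- Same exact return value everywhere.

-- T_dict.get((a, b), 0): lookup in the Python dict built from the pairs (last wins)
def getW (T_dict : List (List Int × Int)) (a b : Int) : Int :=
  PySem.Dict.getD (PySem.Dict.ofList T_dict) [a, b] 0

-- ===== PORT A =====
-- itertools.permutations(range(n)) : selection-order enumeration, fuel = length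
def permsA : Nat → List Int → List (List Int)
  | 0, _ => [[]]
  | fuel+1, l => l.flatMap (fun x => (permsA fuel (l.erase x)).map (fun p => x :: p))

def count_H (T_dict : List (List Int × Int)) (n : Int) : Int :=
  let r := PySem.List.pyRange 0 n 1
  (permsA r.length r).foldl (fun count perm =>
    count + (PySem.List.pyRange 0 (n-1) 1).foldl (fun prod k =>
      -- perm[k], perm[k+1]: k and k+1 are always in range for a permutation of range(n)
      prod * getW T_dict (PySem.List.pyGetD perm k 0) (PySem.List.pyGetD perm (k+1) 0)) 1) 0

-- ===== PORT B =====
def hkEntry (T_dict : List (List Int × Int)) (nn : Nat) (dp : List (List Int))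
    (mask last : Nat) : Int :=
  if (mask >>> last) &&& 1 = 0 then 0
  else if mask = 1 <<< last then 1
  else
    let prev := mask ^^^ (1 <<< last)
    (List.range nn).foldl (fun s p =>
      if (prev >>> p) &&& 1 = 1 then
        s + getW T_dict (last : Int) (p : Int) * ((dp.getD prev []).getD p 0)
      else s) 0

-- the 'for mask in range(1, full): dp.append(...)' loop, as recursion on the mask counter
def hkBuild (T_dict : List (List Int × Int)) (nn : Nat) : Nat → List (List Int)
  | 0 => [List.replicate nn 0]
  | m+1 =>
    let dp := hkBuild T_dict nn m
    dp ++ [(List.range nn).map (fun last => hkEntry T_dict nn dp (m+1) last)]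

def count_H_alt (T_dict : List (List Int × Int)) (n : Int) : Int :=
  if n ≤ 0 then 1
  else
    let nn := n.toNat
    let full := 2 ^ nn
    let dp := hkBuild T_dict nn (full - 1)
    (dp.getD (full - 1) []).foldl (· + ·) 0

-- ===== PRECONDITION & SPEC =====
def Spec_count_H (T_dict : List (List Int × Int)) (n : Int) (out : Int) : Prop := out = count_H_alt T_dict n
instance (T_dict : List (List Int × Int)) (n : Int) (out : Int) : Decidable (Spec_count_H T_dict n out) := by unfold Spec_count_H; infer_instance

-- ===== CLAIM (what is proved, stated in full; the proofs are below) =====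
def Claim_equal_count_H : Prop := ∀ (T_dict : List (List Int × Int)) (n : Int), Dom_count_H T_dict n → Spec_count_H T_dict n (count_H T_dict n)

-- ===== LEMMAS AND PROOFS =====

-- product of the weights along the path f :: q
def pathProd (T_dict : List (List Int × Int)) (f : Int) : List Int → Int
  | [] => 1
  | x :: q => getW T_dict f x * pathProd T_dict x q

def pathHead (T_dict : List (List Int × Int)) : List Int → Int
  | [] => 1
  | x :: q => pathProd T_dict x q

-- E l f = sum over all permutations p of l of pathProd f p
def Esum (T_dict : List (List Int × Int)) (l : List Int) (f : Int) : Int :=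
  ((permsA l.length l).map (pathProd T_dict f)).sum

-- the (Int-valued) list of set-bit positions of a mask, below nn
def maskListI (nn : Nat) (m : Nat) : List Int :=
  ((List.range nn).filter (fun j => m.testBit j)).map Int.ofNat

theorem Esum_nil (T : List (List Int × Int)) (f : Int) : Esum T [] f = 1 := by
  simp [Esum, permsA, pathProd]

theorem permsA_length_mem (fuel : Nat) : ∀ (l : List Int), l.length = fuel →
    ∀ p ∈ permsA fuel l, p.length = fuel := by
  induction fuel with
  | zero => intro l _ p hp; simp [permsA] at hp; simp [hp]
  | succ m ih =>
    intro l hl p hp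
    simp only [permsA, List.mem_flatMap, List.mem_map] at hp
    obtain ⟨x, hx, q, hq, rfl⟩ := hp
    have : (l.erase x).length = m := by
      rw [List.length_erase]; simp [hx, hl]
    simpa using ih (l.erase x) this q hq

theorem Esum_cons (T : List (List Int × Int)) (l : List Int) (f : Int) (hl : l ≠ []) :
    Esum T l f = (l.map (fun x => getW T f x * Esum T (l.erase x) x)).sum := by
  obtain ⟨m, hm⟩ : ∃ m, l.length = m + 1 := by
    cases l with
    | nil => exact absurd rfl hl
    | cons a t => exact ⟨t.length, rfl⟩
  rw [Esum, hm]
  simp only [permsA, List.map_flatMap]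
  rw [List.flatMap, List.sum_flatten, List.map_map]
  congr 1
  apply List.map_congr_left
  intro x hx
  have herase : (l.erase x).length = m := by
    rw [List.length_erase]; simp [hx, hm]
  simp only [Function.comp, List.map_map]
  have : (pathProd T f ∘ fun p => x :: p) = fun p => getW T f x * pathProd T x p := by
    funext p; simp [pathProd]
  rw [this, ← herase]
  exact List.sum_map_mul_left _ _ _

-- inner index fold equals pathProd
theorem idxFold (T : List (List Int × Int)) :
    ∀ (q : List Int) (a acc : Int),
    (List.range q.length).foldl
      (fun prod k => prod * getW T ((a :: q).getD k 0) (q.getD k 0)) acc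
      = acc * pathProd T a q := by
  intro q
  induction q with
  | nil => intro a acc; simp [pathProd]
  | cons b q' ih =>
    intro a acc
    rw [List.length_cons, List.range_succ_eq_map]
    simp only [List.foldl_cons, List.foldl_map, List.getD_cons_zero, List.getD_cons_succ,
      Nat.succ_eq_add_one]
    rw [ih b (acc * getW T a b)]
    simp [pathProd, mul_assoc]

theorem innerA_eq (T : List (List Int × Int)) (n : Int) (hn : 1 ≤ n)
    (perm : List Int) (hlen : perm.length = n.toNat) :
    (PySem.List.pyRange 0 (n-1) 1).foldl (fun prod k =>
      prod * getW T (PySem.List.pyGetD perm k 0) (PySem.List.pyGetD perm (k+1) 0)) 1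
      = pathHead T perm := by
  obtain ⟨a, q, rfl⟩ : ∃ a q, perm = a :: q := by
    cases perm with
    | nil => simp at hlen; omega
    | cons a q => exact ⟨a, q, rfl⟩
  have hq : q.length = (n-1).toNat := by
    simp at hlen; omega
  rw [PySem.List.pyRange_zero, List.foldl_map]
  rw [PySem.List.foldl_congr_mem _ _
    (fun prod k => prod * getW T ((a :: q).getD k 0) (q.getD k 0)) _ ?hcongr]
  case hcongr =>
    intro prod k _
    have h2 : ((k : Int) + 1) = ((k + 1 : Nat) : Int) := by push_cast; ring
    rw [h2, PySem.List.pyGetD_natCast, PySem.List.pyGetD_natCast, List.getD_cons_succ]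
  rw [← hq, idxFold T q a 1, one_mul]
  rfl

-- bit-test normalisation for the port's tests
theorem bit_and_one (m j : Nat) : ((m >>> j) &&& 1 = 1) ↔ m.testBit j := by
  simp [Nat.testBit, Nat.and_one_is_mod]

theorem bit_and_one_zero (m j : Nat) : ((m >>> j) &&& 1 = 0) ↔ m.testBit j = false := by
  rw [← Bool.not_eq_true, ← bit_and_one, Nat.and_one_is_mod]
  omega

theorem filter_erase_of_nodup (f : ℕ → Bool) (p : ℕ) (hfp : f p = true) :
    ∀ (l : List ℕ), l.Nodup →
      l.filter (fun j => f j && !(j == p)) = (l.filter f).erase p := by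
  intro l hl
  induction l with
  | nil => simp
  | cons a t iht =>
    rw [List.nodup_cons] at hl
    rcases eq_or_ne a p with rfl | hne
    · rw [List.filter_cons_of_neg (by simp), List.filter_cons_of_pos hfp,
        List.erase_cons_head]
      apply List.filter_congr
      intro j hj
      have : (j == a) = false := by
        simp only [beq_eq_false_iff_ne]; intro h; exact hl.1 (h ▸ hj)
      simp [this]
    · have hba : (a == p) = false := by simp [hne]
      cases hfa : f a with
      | false =>
        rw [List.filter_cons_of_neg (by simp [hfa]), List.filter_cons_of_neg (by simp [hfa])]
        exact iht hl.2
      | true =>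
        rw [List.filter_cons_of_pos (by simp [hfa, hba]), List.filter_cons_of_pos hfa,
          List.erase_cons_tail (by simp [hne]), iht hl.2]

-- toggling a set bit = erasing the element from the filtered range
theorem filter_toggle (nn p m : Nat) (hp : m.testBit p = true) :
    (List.range nn).filter (fun j => (m ^^^ (1 <<< p)).testBit j)
      = ((List.range nn).filter (fun j => m.testBit j)).erase p := by
  have hbit : ∀ j, (m ^^^ (1 <<< p)).testBit j = (m.testBit j && !(j == p)) := by
    intro j
    rw [Nat.testBit_xor]
    rcases eq_or_ne j p with rfl | hne
    · simp [Nat.shiftLeft_eq, hp]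
    · have h1 : (1 <<< p).testBit j = false := by
        rw [Nat.shiftLeft_eq, one_mul]
        exact Nat.testBit_two_pow_of_ne (fun h => hne h.symm)
      rw [h1]
      cases m.testBit j <;> simp [hne]
  rw [List.filter_congr (fun j _ => hbit j)]
  exact filter_erase_of_nodup _ p hp (List.range nn) List.nodup_range

theorem maskListI_toggle (nn p m : Nat) (hp : m.testBit p = true) :
    maskListI nn (m ^^^ (1 <<< p)) = (maskListI nn m).erase (p : Int) := by
  have hinj : Function.Injective Int.ofNat := by
    intro a b hab; simpa [Int.ofNat_eq_natCast] using hab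
  unfold maskListI
  rw [filter_toggle nn p m hp, List.map_erase hinj]
  rfl

theorem xor_pow_lt (m j : Nat) (h : m.testBit j = true) : m ^^^ (1 <<< j) < m := by
  apply Nat.lt_of_testBit j
  · rw [Nat.testBit_xor, h, Nat.shiftLeft_eq, one_mul, Nat.testBit_two_pow_self]
    rfl
  · exact h
  · intro k hk
    rw [Nat.testBit_xor, Nat.shiftLeft_eq, one_mul,
      Nat.testBit_two_pow_of_ne (by omega : j ≠ k)]
    simp

-- the DP invariant: every row of hkBuild holds the path sums Esum
def rowSpec (T : List (List Int × Int)) (nn k : Nat) : List Int :=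
  (List.range nn).map (fun last =>
    if k.testBit last then Esum T (maskListI nn (k ^^^ (1 <<< last))) (last : Int) else 0)

theorem hkBuild_length (T : List (List Int × Int)) (nn : Nat) :
    ∀ m, (hkBuild T nn m).length = m + 1 := by
  intro m
  induction m with
  | zero => simp [hkBuild]
  | succ m ih => simp [hkBuild, ih]

theorem hkBuild_spec (T : List (List Int × Int)) (nn : Nat) :
    ∀ m, ∀ k ≤ m, k < 2 ^ nn → (hkBuild T nn m).getD k [] = rowSpec T nn k := by
  intro m
  induction m with
  | zero =>
    intro k hk _
    interval_cases k
    simp only [hkBuild, List.getD, List.getElem?_cons_zero, Option.getD_some]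
    unfold rowSpec
    simp
  | succ m ih =>
    intro k hk hk2
    rcases Nat.lt_or_ge k (m+1) with hlt | hge
    · -- old row, unchanged by the append
      have : (hkBuild T nn (m+1)).getD k [] = (hkBuild T nn m).getD k [] := by
        simp only [hkBuild, List.getD]
        rw [List.getElem?_append_left (by rw [hkBuild_length]; omega)]
      rw [this]
      exact ih k (by omega) hk2
    · -- the new row k = m+1
      have hkm : k = m + 1 := by omega
      subst hkm
      have hrow : (hkBuild T nn (m+1)).getD (m+1) [] =
          (List.range nn).map (fun last => hkEntry T nn (hkBuild T nn m) (m+1) last) := by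
        simp only [hkBuild, List.getD]
        rw [List.getElem?_append_right (by simp [hkBuild_length])]
        simp [hkBuild_length]
      rw [hrow]
      unfold rowSpec
      apply List.map_congr_left
      intro last hlast
      cases hbit : (m+1).testBit last with
      | false =>
        have hz : hkEntry T nn (hkBuild T nn m) (m+1) last = 0 := by
          unfold hkEntry
          rw [if_pos ((bit_and_one_zero (m+1) last).mpr hbit)]
        rw [hz]; simp
      | true =>
        simp only [if_pos]
        rcases eq_or_ne (m+1) (1 <<< last) with heq | hne
        · have h1 : hkEntry T nn (hkBuild T nn m) (m+1) last = 1 := by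
            unfold hkEntry
            rw [if_neg (by rw [bit_and_one_zero]; simp [hbit]), if_pos heq]
          have h0 : (m+1) ^^^ (1 <<< last) = 0 := by rw [heq]; simp
          have hml0 : maskListI nn 0 = [] := by simp [maskListI]
          rw [h1, h0, hml0, Esum_nil]
        · -- prev strictly below m+1, rows already correct by ih
          have hprevlt : (m+1) ^^^ (1 <<< last) < m + 1 := xor_pow_lt _ _ hbit
          have hlastnn : last < nn := by
            by_contra hcon
            have h2 : 2 ^ nn ≤ 2 ^ last := Nat.pow_le_pow_right (by omega) (by omega)
            have := Nat.testBit_lt_two_pow (x := m+1) (i := last) (by omega)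
            rw [hbit] at this
            cases this
          have hprev2 : (m+1) ^^^ (1 <<< last) < 2 ^ nn := by
            apply Nat.xor_lt_two_pow hk2
            rw [Nat.shiftLeft_eq, one_mul]
            exact Nat.pow_lt_pow_right (by omega) hlastnn
          have hrows := ih ((m+1) ^^^ (1 <<< last)) (by omega) hprev2
          have hE : hkEntry T nn (hkBuild T nn m) (m+1) last
              = (List.range nn).foldl (fun s p =>
                  if ((((m+1) ^^^ (1 <<< last))) >>> p) &&& 1 = 1 then
                    s + getW T (last : Int) (p : Int) *
                      (((hkBuild T nn m).getD ((m+1) ^^^ (1 <<< last)) []).getD p 0)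
                  else s) 0 := by
            unfold hkEntry
            rw [if_neg (by rw [bit_and_one_zero]; simp [hbit]), if_neg hne]
          rw [hE, hrows]
          -- fold = sum over the set bits of prev
          have hfold : (List.range nn).foldl (fun s p =>
              if ((((m+1) ^^^ (1 <<< last))) >>> p) &&& 1 = 1 then
                s + getW T (last : Int) (p : Int) *
                  ((rowSpec T nn ((m+1) ^^^ (1 <<< last))).getD p 0)
              else s) 0
              = ((List.range nn).filter (fun p => ((m+1) ^^^ (1 <<< last)).testBit p)).foldl
                  (fun (s : Int) (p : Nat) => s + getW T (last : Int) (p : Int) *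
                    Esum T (maskListI nn (((m+1) ^^^ (1 <<< last)) ^^^ (1 <<< p))) (p : Int)) 0 := by
            rw [List.foldl_filter]
            apply PySem.List.foldl_congr_mem
            intro s p hp
            cases hpb : ((m+1) ^^^ (1 <<< last)).testBit p with
            | false => rw [if_neg (by rw [bit_and_one]; simp [hpb])]; simp
            | true =>
              rw [if_pos ((bit_and_one _ p).mpr hpb)]
              simp only [if_pos]
              congr 1
              have hg : (rowSpec T nn ((m+1) ^^^ (1 <<< last))).getD p 0 =
                  if ((m+1) ^^^ (1 <<< last)).testBit p then
                    Esum T (maskListI nn (((m+1) ^^^ (1 <<< last)) ^^^ (1 <<< p))) (p : Int)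
                  else 0 := by
                unfold rowSpec
                rw [List.getD_eq_getElem?_getD, List.getElem?_map]
                have hpn : p < nn := List.mem_range.mp hp
                simp [List.getElem?_range hpn]
              rw [hg, if_pos hpb]
          rw [hfold]
          -- compare with the Esum recurrence on the mask list
          rw [Esum_cons T (maskListI nn ((m+1) ^^^ (1 <<< last))) (last : Int) ?hne0]
          case hne0 =>
            have hprev0 : (m+1) ^^^ (1 <<< last) ≠ 0 := by
              intro h0
              apply hne
              have hx := congrArg (fun x => x ^^^ (1 <<< last)) h0
              simpa [Nat.xor_assoc] using hx
            obtain ⟨j, hj⟩ : ∃ j, ((m+1) ^^^ (1 <<< last)).testBit j = true := by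
              by_contra hcon
              push Not at hcon
              exact hprev0 (Nat.eq_of_testBit_eq (fun j => by simpa using hcon j))
            have hjn : j < nn := by
              by_contra hcon
              have h2 : 2 ^ nn ≤ 2 ^ j := Nat.pow_le_pow_right (by omega) (by omega)
              have := Nat.testBit_lt_two_pow (x := (m+1) ^^^ (1 <<< last)) (i := j) (by omega)
              rw [hj] at this
              cases this
            intro hnil
            have hmem : (j : Int) ∈ maskListI nn ((m+1) ^^^ (1 <<< last)) := by
              unfold maskListI
              simp only [List.mem_map, List.mem_filter, List.mem_range]
              exact ⟨j, ⟨hjn, hj⟩, rfl⟩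
            rw [hnil] at hmem
            exact (List.not_mem_nil) hmem
          -- both are sums over the same list
          rw [PySem.List.foldl_add, zero_add]
          conv_rhs => rw [maskListI]
          rw [List.map_map]
          congr 1
          apply List.map_congr_left
          intro p hp
          have hpb : ((m+1) ^^^ (1 <<< last)).testBit p = true := (List.mem_filter.mp hp).2
          simp only [Function.comp]
          congr 1
          rw [maskListI_toggle nn p _ hpb]
          simp [maskListI, Int.ofNat_eq_natCast]

-- A as a sum over permutations
theorem Ssum_cons (T : List (List Int × Int)) (l : List Int) (hl : l ≠ []) :
    ((permsA l.length l).map (pathHead T)).sum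
      = (l.map (fun x => Esum T (l.erase x) x)).sum := by
  obtain ⟨m, hm⟩ : ∃ m, l.length = m + 1 := by
    cases l with
    | nil => exact absurd rfl hl
    | cons a t => exact ⟨t.length, rfl⟩
  rw [hm]
  simp only [permsA, List.map_flatMap]
  rw [List.flatMap, List.sum_flatten, List.map_map]
  congr 1
  apply List.map_congr_left
  intro x hx
  have herase : (l.erase x).length = m := by
    rw [List.length_erase]; simp [hx, hm]
  simp only [Function.comp, List.map_map]
  have : (pathHead T ∘ fun p => x :: p) = pathProd T x := by
    funext p; simp [pathHead]
  rw [this, Esum, herase]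

theorem countH_pos (T : List (List Int × Int)) (n : Int) (hn : 1 ≤ n) :
    count_H T n = ((PySem.List.pyRange 0 n 1).map
      (fun x => Esum T ((PySem.List.pyRange 0 n 1).erase x) x)).sum := by
  unfold count_H
  set l := PySem.List.pyRange 0 n 1 with hldef
  have hlen : l.length = n.toNat := by
    rw [hldef, PySem.List.length_pyRange_one]
    norm_num
  have hne : l ≠ [] := by
    intro h; rw [h] at hlen; simp at hlen; omega
  rw [PySem.List.foldl_add, zero_add]
  have hmap : (permsA l.length l).map (fun perm =>
      (PySem.List.pyRange 0 (n-1) 1).foldl (fun prod k =>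
        prod * getW T (PySem.List.pyGetD perm k 0) (PySem.List.pyGetD perm (k+1) 0)) 1)
      = (permsA l.length l).map (pathHead T) := by
    apply List.map_congr_left
    intro perm hperm
    have := permsA_length_mem l.length l rfl perm hperm
    exact innerA_eq T n hn perm (by omega)
  rw [hmap, Ssum_cons T l hne]

theorem countH_alt_pos (T : List (List Int × Int)) (n : Int) (hn : 1 ≤ n) :
    count_H_alt T n = ((List.range n.toNat).map
      (fun last => Esum T (maskListI n.toNat ((2 ^ n.toNat - 1) ^^^ (1 <<< last))) (last : Int))).sum := by
  unfold count_H_alt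
  rw [if_neg (by omega)]
  have hfull : 0 < 2 ^ n.toNat := Nat.two_pow_pos n.toNat
  show ((hkBuild T n.toNat (2 ^ n.toNat - 1)).getD (2 ^ n.toNat - 1) []).foldl (· + ·) 0 = _
  rw [hkBuild_spec T n.toNat (2 ^ n.toNat - 1) (2 ^ n.toNat - 1) (le_refl _) (by omega)]
  unfold rowSpec
  rw [PySem.List.foldl_add _ (fun x : Int => x)]
  simp only [zero_add, List.map_id']
  congr 1
  apply List.map_congr_left
  intro last hlast
  have hlastn : last < n.toNat := List.mem_range.mp hlast
  rw [if_pos (by rw [Nat.testBit_two_pow_sub_one]; simp [hlastn])]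

-- ===== VERDICT (by name: the statement is the Claim_ definition above) =====
theorem count_H_spec : Claim_equal_count_H := by
  intro T n _
  unfold Spec_count_H
  by_cases hn : n ≤ 0
  · -- n ≤ 0: one empty permutation, empty inner loop, both sides 1
    have hA : count_H T n = 1 := by
      unfold count_H
      rw [PySem.List.pyRange_one_eq_nil (by omega : n ≤ 0)]
      simp only [List.length_nil, permsA]
      rw [PySem.List.pyRange_one_eq_nil (by omega : n - 1 ≤ 0)]
      simp
    have hB : count_H_alt T n = 1 := by
      unfold count_H_alt
      rw [if_pos (by omega)]
    rw [hA, hB]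
  · -- n ≥ 1: both equal the path-sum over permutations
    have hn1 : 1 ≤ n := by omega
    rw [countH_pos T n hn1, countH_alt_pos T n hn1]
    rw [PySem.List.pyRange_zero, List.map_map]
    apply congrArg
    apply List.map_congr_left
    intro last hlast
    have hlastn : last < n.toNat := List.mem_range.mp hlast
    have hbit : (2 ^ n.toNat - 1).testBit last = true := by
      rw [Nat.testBit_two_pow_sub_one]; simp [hlastn]
    have hml : maskListI n.toNat (2 ^ n.toNat - 1) = (List.range n.toNat).map Int.ofNat := by
      have hf : (List.range n.toNat).filter (fun j => (2 ^ n.toNat - 1).testBit j)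
          = List.range n.toNat := by
        apply List.filter_eq_self.mpr
        intro j hj
        rw [Nat.testBit_two_pow_sub_one]
        simp [List.mem_range.mp hj]
      rw [maskListI, hf]
    simp only [Function.comp]
    rw [maskListI_toggle _ _ _ hbit, hml]
    rfl
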